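-- pv_equiv track=rewrite | github.com/carrier1269/PythonStudy | PyStudy3.py | solution
-- ===== SOURCE A (Python) =====
-- def solution(n):
--     answer = 0
--     a = []
--     for s in range(1,n+1):
--         a.append(s)
--     for x in a:
--         if n % x == 1:
--             answer = x
--             break
--     return answer
-- ===== SOURCE B (Python) =====
-- def solution(n):
--     # Smallest x in 2..n with n % x == 1 is the least divisor > 1 of n - 1,
--     # found by trial division up to sqrt(n - 1).
--     m = n - 1
--     if m < 2:
--         return 0
--     d = 2
--     while d * d <= m:
--         if m % d == 0:
--             return d
--         d += 1
--     return m
-- ===== Notes on version B (the rewrite author's own statement) =====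
-- stated objective: faster
-- what changed: A builds the list [1..n] and scans it for the first x with n % x == 1; B observes that this x is the least divisor > 1 of n-1 and finds it by trial division up to sqrt(n-1), returning n-1 if none divides.
import Mathlib
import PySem

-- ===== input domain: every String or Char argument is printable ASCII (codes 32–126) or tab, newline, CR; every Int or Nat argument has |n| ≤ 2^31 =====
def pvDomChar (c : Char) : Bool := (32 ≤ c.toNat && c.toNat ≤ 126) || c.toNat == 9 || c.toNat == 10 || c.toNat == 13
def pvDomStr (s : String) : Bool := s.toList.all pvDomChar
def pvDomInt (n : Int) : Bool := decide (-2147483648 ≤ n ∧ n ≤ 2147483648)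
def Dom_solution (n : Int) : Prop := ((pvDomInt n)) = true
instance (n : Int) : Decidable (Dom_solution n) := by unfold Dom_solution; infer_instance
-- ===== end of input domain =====

-- B replaces A's O(n) scan of [1..n] by trial division of n-1 up to its square root (asymptotically faster).

-- ===== PORT A =====
-- the second loop of A: first x in the list with n % x == 1, else the initial answer 0
def solutionFind (n : Int) : List Int → Int
  | [] => 0
  | x :: rest => if PySem.Int.mod n x = 1 then x else solutionFind n rest

def solution (n : Int) : Int :=
  solutionFind n (PySem.List.pyRange 1 (n + 1) 1)

-- ===== PORT B =====
-- the while loop of B: first d with d*d ≤ m and m % d == 0, else m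
def trialDiv (m d : Int) : Int :=
  if h : d * d ≤ m then
    if PySem.Int.mod m d = 0 then d
    else trialDiv m (d + 1)
  else m
termination_by (m + 1 - d).toNat
decreasing_by
  have hd : d ≤ m := by nlinarith [mul_self_nonneg d, mul_self_nonneg (d - 1)]
  omega

def solution_alt (n : Int) : Int :=
  let m := n - 1
  if m < 2 then 0 else trialDiv m 2

-- ===== PRECONDITION & SPEC =====
def Spec_solution (n : Int) (out : Int) : Prop := out = solution_alt n
instance (n : Int) (out : Int) : Decidable (Spec_solution n out) := by unfold Spec_solution; infer_instance

-- ===== CLAIM (what is proved, stated in full; the proofs are below) =====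
def Claim_equal_solution : Prop := ∀ (n : Int), Dom_solution n → Spec_solution n (solution n)

-- ===== LEMMAS AND PROOFS =====

-- A's scan returns the first element x of range(a,b) satisfying n % x == 1.
lemma find_spec (n a x b : Int) (hax : a ≤ x) (hxb : x < b)
    (hPx : PySem.Int.mod n x = 1)
    (hmin : ∀ y, a ≤ y → y < x → PySem.Int.mod n y ≠ 1) :
    solutionFind n (PySem.List.pyRange a b 1) = x := by
  have key : ∀ k : Nat, ∀ a : Int, a ≤ x → (x - a).toNat = k →
      (∀ y, a ≤ y → y < x → PySem.Int.mod n y ≠ 1) →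
      solutionFind n (PySem.List.pyRange a b 1) = x := by
    intro k
    induction k with
    | zero =>
      intro a hax h0 _
      have hax' : a = x := by omega
      subst hax'
      rw [PySem.List.pyRange_one_cons (by omega)]
      simp [solutionFind, hPx]
    | succ k ih =>
      intro a hax h0 hmin'
      have hlt : a < x := by omega
      rw [PySem.List.pyRange_one_cons (by omega)]
      simp only [solutionFind]
      rw [if_neg (hmin' a le_rfl hlt)]
      exact ih (a + 1) (by omega) (by omega) (fun y hy => hmin' y (by omega))
  exact key (x - a).toNat a hax rfl hmin

-- if d*d > m while no divisor ≥ 2 of m is below d, then m's least divisor ≥ 2 is m itself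
lemma least_div_of_no_small (m ld d : Int) (hm : 2 ≤ m) (h1 : ld ∣ m) (h2 : 2 ≤ ld)
    (h3 : ∀ e, 2 ≤ e → e ∣ m → ld ≤ e) (hd2 : 2 ≤ d) (hdl : d ≤ ld)
    (hsq : ¬ d * d ≤ m) : m = ld := by
  by_contra hne
  obtain ⟨c, hc⟩ := h1
  have hc1 : 1 ≤ c := by
    rcases (by omega : c ≤ 0 ∨ 1 ≤ c) with h | h
    · exfalso; nlinarith
    · exact h
  have hcne : c ≠ 1 := fun h => hne (by rw [hc, h, mul_one])
  have hc2 : 2 ≤ c := by omega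
  have hlc := h3 c hc2 ⟨ld, by rw [hc]; ring⟩
  have e1 : d * d ≤ ld * ld := mul_le_mul hdl hdl (by omega) (by omega)
  have e2 : ld * ld ≤ ld * c := mul_le_mul_of_nonneg_left hlc (by omega)
  have hsq' : m < d * d := not_le.mp hsq
  linarith [hc]

-- B's trial division returns the least divisor ld ≥ 2 of m, when started at any d with 2 ≤ d ≤ ld.
lemma trial_eq (m ld : Int) (hm : 2 ≤ m) (h1 : ld ∣ m) (h2 : 2 ≤ ld)
    (h3 : ∀ e, 2 ≤ e → e ∣ m → ld ≤ e) :
    ∀ (k : Nat) (d : Int), 2 ≤ d → d ≤ ld → (ld - d).toNat ≤ k → trialDiv m d = ld := by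
  intro k
  induction k with
  | zero =>
    intro d hd2 hdl h0
    have : d = ld := by omega
    subst this
    rw [trialDiv]
    by_cases hsq : d * d ≤ m
    · rw [dif_pos hsq, if_pos ((PySem.Int.mod_eq_zero_iff_dvd m d).mpr h1)]
    · rw [dif_neg hsq]
      exact least_div_of_no_small m d d hm h1 hd2 h3 hd2 le_rfl hsq
  | succ k ih =>
    intro d hd2 hdl h0
    rw [trialDiv]
    by_cases hsq : d * d ≤ m
    · rw [dif_pos hsq]
      by_cases hmod : PySem.Int.mod m d = 0
      · rw [if_pos hmod]
        have hdvd : d ∣ m := (PySem.Int.mod_eq_zero_iff_dvd m d).mp hmod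
        have := h3 d hd2 hdvd
        omega
      · rw [if_neg hmod]
        have hne : d ≠ ld := by
          intro h; apply hmod
          rw [h]; exact (PySem.Int.mod_eq_zero_iff_dvd m ld).mpr h1
        exact ih (d + 1) (by omega) (by omega) (by omega)
    · rw [dif_neg hsq]
      exact least_div_of_no_small m ld d hm h1 h2 h3 hd2 hdl hsq

lemma main_eq (n : Int) : solution n = solution_alt n := by
  rcases (by omega : n ≤ 0 ∨ 0 < n) with hn | hn
  · -- empty range
    unfold solution solution_alt
    rw [PySem.List.pyRange_one_eq_nil (by omega)]
    simp only [solutionFind]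
    rw [if_pos (by omega)]
  · rcases (by omega : n < 3 ∨ 3 ≤ n) with hn3 | hn3
    · interval_cases n <;> decide
    · -- n ≥ 3; let m = n - 1 ≥ 2, ld = least divisor ≥ 2 of m
      set m : Int := n - 1 with hm
      have hm2 : 2 ≤ m := by omega
      have hex : ∃ k : Nat, 2 ≤ k ∧ (k : Int) ∣ m :=
        ⟨m.toNat, by omega, by rw [Int.toNat_of_nonneg (by omega)]⟩
      classical
      obtain ⟨hld2n, hld1⟩ := Nat.find_spec hex
      set ld : Int := ((Nat.find hex : Nat) : Int) with hldd
      have hld2 : 2 ≤ ld := by rw [hldd]; exact_mod_cast hld2n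
      have h3 : ∀ e : Int, 2 ≤ e → e ∣ m → ld ≤ e := by
        intro e he hdvd
        have he' : e = (e.toNat : Int) := (Int.toNat_of_nonneg (by omega)).symm
        have : Nat.find hex ≤ e.toNat := by
          apply Nat.find_le
          exact ⟨by omega, by rwa [← he']⟩
        omega
      have hldm : ld ≤ m := h3 m hm2 dvd_rfl
      -- A side
      have hA : solution n = ld := by
        unfold solution
        apply find_spec n 1 ld (n + 1) (by omega) (by omega)
        · -- n % ld = 1
          rw [PySem.Int.mod_eq_emod_of_pos (by omega : (0:Int) < ld)]
          obtain ⟨c, hc⟩ := hld1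
          have hnval : n = 1 + ld * c := by omega
          rw [hnval, Int.add_mul_emod_self_left]
          exact Int.emod_eq_of_lt (by omega) (by omega)
        · intro y hy1 hylt hmod
          rcases eq_or_lt_of_le hy1 with hy | hy
          · rw [PySem.Int.mod_eq_emod_of_pos (by omega : (0:Int) < y), ← hy] at hmod
            simp at hmod
          · -- 2 ≤ y, n % y = 1 ⇒ y ∣ m, contradiction with minimality
            have hy2 : 2 ≤ y := by omega
            rw [PySem.Int.mod_eq_emod_of_pos (by omega : (0:Int) < y)] at hmod
            have hdvd : y ∣ m := by
              apply Int.dvd_of_emod_eq_zero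
              have h1y : (1 : Int) % y = 1 := Int.emod_eq_of_lt (by omega) (by omega)
              calc m % y = (n - 1) % y := by rw [hm]
                _ = (n % y - 1 % y) % y := by rw [Int.sub_emod]
                _ = 0 := by rw [hmod, h1y]; simp
            have := h3 y hy2 hdvd
            omega
      -- B side
      have hB : solution_alt n = ld := by
        unfold solution_alt
        rw [if_neg (by omega)]
        exact trial_eq m ld hm2 hld1 hld2 h3 (ld - 2).toNat 2 (by omega) hld2 (by omega)
      rw [hA, hB]

-- ===== VERDICT (by name: the statement is the Claim_ definition above) =====
theorem solution_spec : Claim_equal_solution := by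
  intro n _
  unfold Spec_solution
  exact main_eq n
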